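-- pv_equiv track=rewrite | github.com/QuHarmonics/Nexus-4-Framework-Recursive-Harmonic-Architecture | Python Code - Raw Dump/Nexus 4 Framework -SHA-Revisited-checkpoint-code_4- Qu Harmonics.py | simulate_advanced_kinetics
-- ===== SOURCE A (Python) =====
-- def simulate_advanced_kinetics(asm_instructions, initial_value=0):
--     value = initial_value
--     kinetic_progress = []
--     for instruction in asm_instructions:
--         if instruction.startswith("add"):
--             delta = int(instruction.split(" ")[1], 16)
--             value += delta
--         elif instruction.startswith("sub"):
--             delta = int(instruction.split(" ")[1], 16)
--             value -= delta
--         elif instruction.startswith("nop"):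
--             value = value
--         elif instruction.startswith("xor"):
--             delta = int(instruction.split(" ")[1], 16)
--             value ^= delta
--         elif instruction.startswith("shl"):
--             shift = int(instruction.split(" ")[1], 16)
--             value <<= shift
--         kinetic_progress.append(value)
--     return kinetic_progress
-- ===== SOURCE B (Python) =====
-- def _compile1(ins):
--     """Translate one instruction into an (opcode, operand) pair; anything
--     unrecognized (including nop) compiles to ("nop", 0)."""
--     for op in ("add", "sub", "xor", "shl"):
--         if ins.startswith(op):
--             return (op, int(ins.split(" ")[1], 16))
--     return (("nop", 0))
--
--
-- def _run(prog, value):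
--     """Divide-and-conquer interpreter: run the first half of the compiled
--     program, then the second half seeded with the first half's last value."""
--     if not prog:
--         return []
--     if len(prog) == 1:
--         op, d = prog[0]
--         if op == "add":
--             value = value + d
--         elif op == "sub":
--             value = value - d
--         elif op == "xor":
--             value = value ^ d
--         elif op == "shl":
--             value = value << d
--         return [value]
--     mid = len(prog) // 2
--     left = _run(prog[:mid], value)
--     return left + _run(prog[mid:], left[-1])
--
--
-- def simulate_advanced_kinetics(asm_instructions, initial_value=0):
--     prog = [_compile1(ins) for ins in asm_instructions]
--     return _run(prog, initial_value)
-- ===== Notes on version B (the rewrite author's own statement) =====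
-- stated objective: alternative
-- what changed: B replaces A's single inline parse-and-update loop with append by two stages: a compile pass mapping every instruction to an (opcode, operand) pair, followed by a divide-and-conquer interpreter that runs the first half of the compiled program and then the second half seeded with the first half's last trace value.
import Mathlib
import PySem

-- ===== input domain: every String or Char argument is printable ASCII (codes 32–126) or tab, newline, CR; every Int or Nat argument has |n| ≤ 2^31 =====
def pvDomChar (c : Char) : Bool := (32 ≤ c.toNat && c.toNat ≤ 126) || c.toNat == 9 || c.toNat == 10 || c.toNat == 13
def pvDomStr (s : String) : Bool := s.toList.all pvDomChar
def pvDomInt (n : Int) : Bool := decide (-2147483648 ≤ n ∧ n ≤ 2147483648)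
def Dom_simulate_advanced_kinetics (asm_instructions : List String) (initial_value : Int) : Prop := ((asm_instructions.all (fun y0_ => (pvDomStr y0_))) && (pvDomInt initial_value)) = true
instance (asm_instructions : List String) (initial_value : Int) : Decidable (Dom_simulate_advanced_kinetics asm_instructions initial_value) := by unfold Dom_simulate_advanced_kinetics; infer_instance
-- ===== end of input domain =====

-- B replaces A's single parse-and-update loop by a compile pass to (opcode, operand) pairs
-- followed by a divide-and-conquer interpreter; objective: alternative.

-- shared token parser: int(instruction.split(" ")[1], 16); none exactly where Python raises
-- (IndexError: no second token, or ValueError: not hex)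
def pvHexTok (s : String) : Option Int :=
  match PySem.Str.split? s " " with
  | some parts =>
    match PySem.List.pyGet? parts 1 with
    | some t => PySem.Int.ofStrBase? t 16
    | none => none
  | none => none

-- ===== PORT A =====
-- loop body of A (delta/shift use .getD 0 only outside Pre_, where Python raises)
def pvBodyA (st : Int × List Int) (instruction : String) : Int × List Int :=
  let value := st.1
  let value :=
    if PySem.Str.startswith instruction "add" then
      value + (pvHexTok instruction).getD 0
    else if PySem.Str.startswith instruction "sub" then
      value - (pvHexTok instruction).getD 0
    else if PySem.Str.startswith instruction "nop" then
      value
    else if PySem.Str.startswith instruction "xor" then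
      PySem.Int.bxor value ((pvHexTok instruction).getD 0)
    else if PySem.Str.startswith instruction "shl" then
      value <<< ((pvHexTok instruction).getD 0).toNat
    else value
  (value, st.2 ++ [value])

def simulate_advanced_kinetics (asm_instructions : List String) (initial_value : Int) : List Int :=
  (asm_instructions.foldl pvBodyA (initial_value, [])).2

-- ===== PORT B =====
-- _compile1 of Source B: the for-loop over the opcode tuple, unrolled in order
def pvCompile1 (ins : String) : String × Int :=
  if PySem.Str.startswith ins "add" then ("add", (pvHexTok ins).getD 0)
  else if PySem.Str.startswith ins "sub" then ("sub", (pvHexTok ins).getD 0)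
  else if PySem.Str.startswith ins "xor" then ("xor", (pvHexTok ins).getD 0)
  else if PySem.Str.startswith ins "shl" then ("shl", (pvHexTok ins).getD 0)
  else ("nop", 0)

-- the opcode dispatch of _run's single-instruction base case
def pvApply (value : Int) (p : String × Int) : Int :=
  if p.1 = "add" then value + p.2
  else if p.1 = "sub" then value - p.2
  else if p.1 = "xor" then PySem.Int.bxor value p.2
  else if p.1 = "shl" then value <<< p.2.toNat
  else value

-- _run of Source B: divide-and-conquer interpreter of the compiled program
-- (left[-1] via pyGet?; .getD 0 is unreachable: left is nonempty since mid ≥ 1)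
def pvRunD : List (String × Int) → Int → List Int
  | [], _ => []
  | [p], value => [pvApply value p]
  | a :: b :: t, value =>
    let prog := a :: b :: t
    let mid := prog.length / 2
    let left := pvRunD (PySem.List.slice prog none (some (mid : Int))) value
    left ++ pvRunD (PySem.List.slice prog (some (mid : Int)) none)
      ((PySem.List.pyGet? left (-1)).getD 0)
termination_by prog _ => prog.length
decreasing_by
  · simp only [PySem.List.slice_to_natCast, List.length_take, List.length_cons]; omega
  · simp only [PySem.List.slice_from_natCast, List.length_drop, List.length_cons]; omega

def simulate_advanced_kinetics_alt (asm_instructions : List String) (initial_value : Int) : List Int :=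
  pvRunD (asm_instructions.map pvCompile1) initial_value

-- ===== PRECONDITION & SPEC =====
-- an instruction is fine unless an add/sub/xor/shl opcode's hex operand is missing or malformed
-- (Python raises IndexError/ValueError there), or a shl shift is negative (ValueError)
def pvOkInstr (s : String) : Bool :=
  if PySem.Str.startswith s "add" || PySem.Str.startswith s "sub" || PySem.Str.startswith s "xor" then
    (pvHexTok s).isSome
  else if PySem.Str.startswith s "shl" then
    match pvHexTok s with
    | some k => decide (0 ≤ k)
    | none => false
  else true

-- exactly the inputs on which Python A returns (no exception)
def Pre_simulate_advanced_kinetics (asm_instructions : List String) (initial_value : Int) : Prop :=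
  ∀ s ∈ asm_instructions, pvOkInstr s = true
instance (asm_instructions : List String) (initial_value : Int) : Decidable (Pre_simulate_advanced_kinetics asm_instructions initial_value) := by unfold Pre_simulate_advanced_kinetics; infer_instance

def pvWitness_simulate_advanced_kinetics : List String × Int :=
  (["add 1f", "shl 2", "nop", "xor ff", "sub a", "halt"], 5)

def Spec_simulate_advanced_kinetics (asm_instructions : List String) (initial_value : Int) (out : List Int) : Prop := out = simulate_advanced_kinetics_alt asm_instructions initial_value
instance (asm_instructions : List String) (initial_value : Int) (out : List Int) : Decidable (Spec_simulate_advanced_kinetics asm_instructions initial_value out) := by unfold Spec_simulate_advanced_kinetics; infer_instance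

-- ===== CLAIM (what is proved, stated in full; the proofs are below) =====
def Claim_equal_simulate_advanced_kinetics : Prop := ∀ (asm_instructions : List String) (initial_value : Int), Dom_simulate_advanced_kinetics asm_instructions initial_value → Pre_simulate_advanced_kinetics asm_instructions initial_value → Spec_simulate_advanced_kinetics asm_instructions initial_value (simulate_advanced_kinetics asm_instructions initial_value)

-- ===== LEMMAS AND PROOFS =====

-- the linear (left-to-right) run of a compiled program: the common specification
def pvRunL : List (String × Int) → Int → List Int
  | [], _ => []
  | p :: rest, value => pvApply value p :: pvRunL rest (pvApply value p)

-- a string cannot start with two distinct equal-length prefixes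
lemma pvStarts_unique (s p q : String) (hlen : p.toList.length = q.toList.length) (hne : p ≠ q)
    (hp : PySem.Str.startswith s p = true) : PySem.Str.startswith s q = true → False := by
  intro hq
  have hp' : p.toList <+: s.toList := by
    simpa [PySem.Str.startswith, PySem.Chars.startswith_iff] using hp
  have hq' : q.toList <+: s.toList := by
    simpa [PySem.Str.startswith, PySem.Chars.startswith_iff] using hq
  rw [List.prefix_iff_eq_take] at hp' hq'
  exact hne (String.toList_inj.1 (hp'.trans (by rw [hlen, ← hq'])))

-- A's if/elif chain computes B's compile-then-apply
lemma pvBodyA_eq (st : Int × List Int) (s : String) :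
    pvBodyA st s = (pvApply st.1 (pvCompile1 s), st.2 ++ [pvApply st.1 (pvCompile1 s)]) := by
  have uniq : ∀ (p q : String), p.toList.length = q.toList.length → p ≠ q →
      PySem.Chars.startswith s.toList p.toList = true →
      PySem.Chars.startswith s.toList q.toList = true → False := fun p q h1 h2 hp hq =>
    pvStarts_unique s p q h1 h2 (by simpa [PySem.Str.startswith] using hp)
      (by simpa [PySem.Str.startswith] using hq)
  by_cases ha : PySem.Chars.startswith s.toList ['a','d','d'] = true
  · have hb : ¬ PySem.Chars.startswith s.toList ['s','u','b'] = true :=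
      fun h => uniq "add" "sub" (by decide) (by decide) ha h
    simp [pvBodyA, pvCompile1, pvApply, PySem.Str.startswith, ha, hb]
  · by_cases hb : PySem.Chars.startswith s.toList ['s','u','b'] = true
    · simp [pvBodyA, pvCompile1, pvApply, PySem.Str.startswith, ha, hb]
    · by_cases hc : PySem.Chars.startswith s.toList ['n','o','p'] = true
      · have hd : ¬ PySem.Chars.startswith s.toList ['x','o','r'] = true :=
          fun h => uniq "nop" "xor" (by decide) (by decide) hc h
        have he : ¬ PySem.Chars.startswith s.toList ['s','h','l'] = true :=
          fun h => uniq "nop" "shl" (by decide) (by decide) hc h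
        simp [pvBodyA, pvCompile1, pvApply, PySem.Str.startswith, ha, hb, hc, hd, he]
      · by_cases hd : PySem.Chars.startswith s.toList ['x','o','r'] = true
        · simp [pvBodyA, pvCompile1, pvApply, PySem.Str.startswith, ha, hb, hc, hd]
        · by_cases he : PySem.Chars.startswith s.toList ['s','h','l'] = true
          · simp [pvBodyA, pvCompile1, pvApply, PySem.Str.startswith, ha, hb, hc, hd, he]
          · simp [pvBodyA, pvCompile1, pvApply, PySem.Str.startswith, ha, hb, hc, hd, he]

-- A's append loop produces the linear run of the compiled program
lemma pvLoop_eq (l : List String) (v : Int) (acc : List Int) :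
    (l.foldl pvBodyA (v, acc)).2 = acc ++ pvRunL (l.map pvCompile1) v := by
  induction l generalizing v acc with
  | nil => simp [pvRunL]
  | cons i rest ih =>
    rw [List.foldl_cons, pvBodyA_eq (v, acc) i, List.map_cons]
    simp only [pvRunL]
    rw [ih]
    simp

-- the linear run splits at any concatenation point
lemma pvRunL_append (l1 l2 : List (String × Int)) (v : Int) :
    pvRunL (l1 ++ l2) v = pvRunL l1 v ++ pvRunL l2 (l1.foldl pvApply v) := by
  induction l1 generalizing v with
  | nil => simp [pvRunL]
  | cons p rest ih => simp [pvRunL, ih]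

-- the last trace value of a nonempty linear run is the folded final value
lemma pvRunL_getLast? (l : List (String × Int)) (v : Int) (h : l ≠ []) :
    (pvRunL l v).getLast? = some (l.foldl pvApply v) := by
  induction l generalizing v with
  | nil => exact absurd rfl h
  | cons p rest ih =>
    cases rest with
    | nil => simp [pvRunL]
    | cons q t =>
      have h2 := ih (v := pvApply v p) (by simp)
      rw [show pvRunL (p::q::t) v = pvApply v p :: pvRunL (q::t) (pvApply v p) from rfl,
          show pvRunL (q::t) (pvApply v p)
            = pvApply (pvApply v p) q :: pvRunL t (pvApply (pvApply v p) q) from rfl,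
          List.getLast?_cons_cons,
          show pvApply (pvApply v p) q :: pvRunL t (pvApply (pvApply v p) q)
            = pvRunL (q::t) (pvApply v p) from rfl, h2]
      simp

-- the divide-and-conquer run equals the linear run
lemma pvRunD_eq (l : List (String × Int)) (v : Int) : pvRunD l v = pvRunL l v := by
  induction hn : l.length using Nat.strong_induction_on generalizing l v with
  | _ n ih =>
  match l with
  | [] => simp [pvRunD, pvRunL]
  | [p] => simp [pvRunD, pvRunL]
  | a :: b :: t =>
    have hlen : (a :: b :: t).length = n := hn
    have hmid1 : 1 ≤ (a :: b :: t).length / 2 := by simp; omega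
    have hmidlt : (a :: b :: t).length / 2 < (a :: b :: t).length := by simp; omega
    rw [pvRunD]
    simp only [PySem.List.slice_to_natCast, PySem.List.slice_from_natCast]
    set l' := a :: b :: t with hl'
    set mid := l'.length / 2 with hmid
    have htake : (l'.take mid).length = mid := by
      rw [List.length_take]; omega
    have h1 : pvRunD (l'.take mid) v = pvRunL (l'.take mid) v :=
      ih (l'.take mid).length (by omega) _ v rfl
    have htne : l'.take mid ≠ [] := by
      intro h; rw [h] at htake; simp at htake; omega
    have hlast : (PySem.List.pyGet? (pvRunL (l'.take mid) v) (-1)).getD 0 =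
        (l'.take mid).foldl pvApply v := by
      rw [PySem.List.pyGet?_neg_one, pvRunL_getLast? _ _ htne]; rfl
    rw [h1, hlast,
      ih ((l'.drop mid).length) (by rw [List.length_drop]; omega) _ _ rfl,
      ← pvRunL_append, List.take_append_drop]

-- ===== VERDICT (by name: the statement is the Claim_ definition above) =====
theorem simulate_advanced_kinetics_spec : Claim_equal_simulate_advanced_kinetics := by
  intro asm_instructions initial_value _ _
  unfold Spec_simulate_advanced_kinetics
  unfold simulate_advanced_kinetics simulate_advanced_kinetics_alt
  rw [pvLoop_eq, List.nil_append, pvRunD_eq]
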